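-- pv_equiv track=rewrite | github.com/DeadlyKurbo/project-spectre | config_app.py | _normalize_badge_label
-- ===== SOURCE A (Python) =====
-- def _normalize_badge_label(value: str | None) -> str:
--     text = (value or "").strip().lower()
--     if not text:
--         return ""
--     filtered = [ch if ch.isalnum() else "-" for ch in text]
--     normalized = "".join(filtered)
--     parts = [segment for segment in normalized.split("-") if segment]
--     return "-".join(parts)
-- ===== SOURCE B (Python) =====
-- def _normalize_badge_label(value: str | None) -> str:
--     # Single accumulating pass: emit a dash only between alnum runs, so leading/
--     # trailing/collapsed dashes never appear and no split/join phase is needed.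
--     text = (value or "").strip().lower()
--     out = []
--     pending = False
--     for ch in text:
--         if ch.isalnum():
--             if out and pending:
--                 out.append("-")
--             out.append(ch)
--             pending = False
--         else:
--             pending = True
--     return "".join(out)
-- ===== Notes on version B (the rewrite author's own statement) =====
-- stated objective: simpler
-- what changed: Replaced A's three-phase pipeline (map chars to char-or-dash, split on '-', filter empty segments, re-join) by one accumulating pass with a pending-separator flag that emits a dash only between alnum runs.
import Mathlib
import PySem

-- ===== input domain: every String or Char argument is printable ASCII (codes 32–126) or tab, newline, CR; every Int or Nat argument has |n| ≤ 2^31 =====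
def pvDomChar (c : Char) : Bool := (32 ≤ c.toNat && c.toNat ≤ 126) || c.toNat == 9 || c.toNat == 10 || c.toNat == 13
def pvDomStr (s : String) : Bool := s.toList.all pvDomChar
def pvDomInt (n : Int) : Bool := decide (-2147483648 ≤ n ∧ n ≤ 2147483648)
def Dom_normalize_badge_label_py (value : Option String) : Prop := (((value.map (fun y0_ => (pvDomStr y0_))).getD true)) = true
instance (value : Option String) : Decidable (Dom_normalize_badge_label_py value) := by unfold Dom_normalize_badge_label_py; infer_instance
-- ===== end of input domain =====

-- B replaces A's map/split/filter/join pipeline by one accumulating pass with a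
-- pending-separator flag (objective: simpler; same O(n) cost).

-- ===== PORT A =====
-- Python: text = (value or "").strip().lower(); if not text: return "";
-- filtered = [ch if ch.isalnum() else "-" for ch in text]; normalized = "".join(filtered)
-- (a join of 1-char strings: kept as the char list itself, exact);
-- parts = [seg for seg in normalized.split("-") if seg]; return "-".join(parts)
def normalize_badge_label_py (value : Option String) : String :=
  let text := PySem.Str.lower (PySem.Str.strip (value.getD ""))
  if text = "" then ""
  else
    let filtered := text.toList.map (fun ch => if PySem.Chars.isalnum ch then ch else '-')
    let normalized := filtered
    let parts := (PySem.Chars.splitOn normalized ['-']).filter (fun seg => !seg.isEmpty)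
    String.ofList (PySem.Chars.join ['-'] parts)

-- ===== PORT B =====
-- Python: one pass over text with out : list[char] and pending : bool;
-- alnum ch appends ('-' first iff out nonempty and pending), else sets pending.
def normalize_badge_label_py_alt (value : Option String) : String :=
  let text := PySem.Str.lower (PySem.Str.strip (value.getD ""))
  let st := text.toList.foldl
    (fun (acc : List Char × Bool) ch =>
      if PySem.Chars.isalnum ch then
        ((acc.1 ++ (if !acc.1.isEmpty && acc.2 then ['-'] else [])) ++ [ch], false)
      else
        (acc.1, true))
    ([], false)
  String.ofList st.1

-- ===== PRECONDITION & SPEC =====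
def Spec_normalize_badge_label_py (value : Option String) (out : String) : Prop := out = normalize_badge_label_py_alt value
instance (value : Option String) (out : String) : Decidable (Spec_normalize_badge_label_py value out) := by unfold Spec_normalize_badge_label_py; infer_instance

-- ===== CLAIM (what is proved, stated in full; the proofs are below) =====
def Claim_equal_normalize_badge_label_py : Prop := ∀ (value : Option String), Dom_normalize_badge_label_py value → Spec_normalize_badge_label_py value (normalize_badge_label_py value)

-- ===== LEMMAS AND PROOFS =====

-- Reference form of splitOn `-` : segments, with `cur` the reversed current segment.
def pvSegs (cur : List Char) : List Char → List (List Char)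
  | [] => [cur.reverse]
  | c :: r => if c = '-' then cur.reverse :: pvSegs [] r else pvSegs (c :: cur) r

-- Reference form of B's loop after state (ne = "out nonempty", p = pending).
def pvBrun (ne p : Bool) : List Char → List Char
  | [] => []
  | c :: r =>
    if PySem.Chars.isalnum c then (if ne && p then ['-'] else []) ++ c :: pvBrun true false r
    else pvBrun ne true r

def pvEnc (c : Char) : Char := if PySem.Chars.isalnum c then c else '-'

lemma pvGo_nil (n : Nat) (cur : List Char) (acc : List (List Char)) :
    PySem.Chars.splitOn.go ['-'] (n+1) [] cur acc = (cur.reverse :: acc).reverse := by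
  simp [PySem.Chars.splitOn.go]

lemma pvGo_cons (n : Nat) (c : Char) (rest cur : List Char) (acc : List (List Char)) :
    PySem.Chars.splitOn.go ['-'] (n+1) (c :: rest) cur acc =
      if c = '-' then PySem.Chars.splitOn.go ['-'] n rest [] (cur.reverse :: acc)
      else PySem.Chars.splitOn.go ['-'] n rest (c :: cur) acc := by
  by_cases h : c = '-'
  · subst h; simp [PySem.Chars.splitOn.go, List.isPrefixOf]
  · have hb : (('-' : Char) == c) = false := beq_eq_false_iff_ne.mpr (Ne.symm h)
    simp [PySem.Chars.splitOn.go, List.isPrefixOf, hb, h]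

lemma pvGo_eq (fuel : Nat) : ∀ (l cur : List Char) (acc : List (List Char)),
    l.length < fuel →
    PySem.Chars.splitOn.go ['-'] fuel l cur acc = acc.reverse ++ pvSegs cur l := by
  induction fuel with
  | zero => intro l cur acc h; omega
  | succ n ih =>
    intro l cur acc h
    cases l with
    | nil => simp [pvGo_nil, pvSegs]
    | cons c rest =>
      rw [pvGo_cons]
      by_cases hc : c = '-'
      · rw [if_pos hc, ih rest [] (cur.reverse :: acc) (by simp at h; omega)]
        simp [pvSegs, hc]
      · rw [if_neg hc, ih rest (c :: cur) acc (by simp at h; omega)]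
        simp [pvSegs, hc]

lemma pvSplitOn_eq (l : List Char) : PySem.Chars.splitOn l ['-'] = pvSegs [] l := by
  have := pvGo_eq (l.length + 1) l [] [] (Nat.lt_succ_self _)
  simpa [PySem.Chars.splitOn] using this

lemma pvJoin_cons (a : List Char) (L : List (List Char)) :
    PySem.Chars.join ['-'] (a :: L) =
      a ++ (if L = [] then [] else '-' :: PySem.Chars.join ['-'] L) := by
  cases L with
  | nil => simp [PySem.Chars.join, List.intercalate]
  | cons b t => simp [PySem.Chars.join, List.intercalate, List.intersperse]

lemma pvAlnum_ne_dash (c : Char) (h : PySem.Chars.isalnum c = true) : c ≠ '-' := by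
  intro hc; subst hc
  simp [PySem.Chars.isalnum] at h
  revert h; decide

lemma pvBrun_false (c : Char) (r : List Char) (ne p : Bool)
    (hc : PySem.Chars.isalnum c = false) : pvBrun ne p (c :: r) = pvBrun ne true r := by
  simp [pvBrun, hc]

lemma pvMain (cs : List Char) :
    (∀ p, pvBrun false p cs =
      PySem.Chars.join ['-'] ((pvSegs [] (cs.map pvEnc)).filter (fun s => !s.isEmpty))) ∧
    (∀ cur : List Char, cur ≠ [] →
      PySem.Chars.join ['-'] ((pvSegs cur (cs.map pvEnc)).filter (fun s => !s.isEmpty)) =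
        cur.reverse ++ pvBrun true false cs) ∧
    (pvBrun true true cs =
      if ((pvSegs [] (cs.map pvEnc)).filter (fun s => !s.isEmpty)) = [] then []
      else '-' :: PySem.Chars.join ['-'] ((pvSegs [] (cs.map pvEnc)).filter (fun s => !s.isEmpty))) := by
  induction cs with
  | nil =>
    refine ⟨fun p => by simp [pvBrun, pvSegs, PySem.Chars.join, List.intercalate],
            fun cur hcur => ?_, by simp [pvBrun, pvSegs]⟩
    have hrev : (cur.reverse.isEmpty) = false := by simp [hcur]
    simp [pvSegs, hrev, pvBrun, PySem.Chars.join, List.intercalate]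
  | cons c r ih =>
    obtain ⟨ih1, ih2, ih3⟩ := ih
    by_cases hc : PySem.Chars.isalnum c = true
    · have hcd : pvEnc c = c := by simp [pvEnc, hc]
      have hne : c ≠ '-' := pvAlnum_ne_dash c hc
      have hP2c : ∀ cur : List Char,
          PySem.Chars.join ['-'] ((pvSegs cur ((c :: r).map pvEnc)).filter (fun s => !s.isEmpty)) =
            (c :: cur).reverse ++ pvBrun true false r := by
        intro cur
        have key : pvSegs cur ((c :: r).map pvEnc) = pvSegs (c :: cur) (r.map pvEnc) := by
          simp [pvSegs, hcd, hne]
        rw [key]; exact ih2 (c :: cur) (by simp)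
      have h1 := hP2c []
      simp only [List.reverse_cons, List.reverse_nil, List.nil_append] at h1
      refine ⟨fun p => ?_, fun cur hcur => ?_, ?_⟩
      · rw [h1]; simp [pvBrun, hc]
      · rw [hP2c cur]; simp [pvBrun, hc]
      · have hfil : ((pvSegs [] ((c :: r).map pvEnc)).filter (fun s => !s.isEmpty)) ≠ [] := by
          intro h0
          rw [h0] at h1
          simp [PySem.Chars.join, List.intercalate] at h1
        rw [if_neg hfil, h1]
        simp [pvBrun, hc]
    · have hcb : PySem.Chars.isalnum c = false := by
        cases h' : PySem.Chars.isalnum c; rfl; exact absurd h' hc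
      have hcd : pvEnc c = '-' := by simp [pvEnc, hcb]
      have hseg : ∀ cur : List Char,
          pvSegs cur ((c :: r).map pvEnc) = cur.reverse :: pvSegs [] (r.map pvEnc) := by
        intro cur; simp [pvSegs, hcd]
      refine ⟨fun p => ?_, fun cur hcur => ?_, ?_⟩
      · rw [pvBrun_false c r false p hcb, ih1 true, hseg []]
        simp
      · have hrev : (cur.reverse.isEmpty) = false := by simp [hcur]
        have hfc : (cur.reverse :: pvSegs [] (r.map pvEnc)).filter (fun s => !s.isEmpty) =
            cur.reverse :: (pvSegs [] (r.map pvEnc)).filter (fun s => !s.isEmpty) := by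
          rw [List.filter_cons, hrev]; simp
        rw [hseg cur, hfc, pvJoin_cons, pvBrun_false c r true false hcb, ih3]
      · rw [pvBrun_false c r true true hcb, ih3, hseg []]
        simp

lemma pvFold_eq (cs : List Char) : ∀ (out : List Char) (p : Bool),
    (cs.foldl
      (fun (acc : List Char × Bool) ch =>
        if PySem.Chars.isalnum ch then
          ((acc.1 ++ (if !acc.1.isEmpty && acc.2 then ['-'] else [])) ++ [ch], false)
        else
          (acc.1, true))
      (out, p)).1 = out ++ pvBrun (!out.isEmpty) p cs := by
  induction cs with
  | nil => intro out p; simp [pvBrun]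
  | cons c r ih =>
    intro out p
    rw [List.foldl_cons]
    by_cases hc : PySem.Chars.isalnum c = true
    · rw [if_pos hc, ih, show (!((out ++ (if !out.isEmpty && p then ['-'] else [])) ++ [c]).isEmpty) = true by simp]
      simp [pvBrun, hc]
    · have hcb : PySem.Chars.isalnum c = false := by
        cases h' : PySem.Chars.isalnum c; rfl; exact absurd h' hc
      rw [if_neg (by simp [hcb]), ih, pvBrun_false c r (!out.isEmpty) p hcb]

-- ===== VERDICT (by name: the statement is the Claim_ definition above) =====
theorem normalize_badge_label_py_spec : Claim_equal_normalize_badge_label_py := by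
  intro value _
  show normalize_badge_label_py value = normalize_badge_label_py_alt value
  unfold normalize_badge_label_py normalize_badge_label_py_alt
  set text := PySem.Str.lower (PySem.Str.strip (value.getD "")) with htext
  by_cases h0 : text = ""
  · rw [if_pos h0, h0]
    rfl
  · rw [if_neg h0]
    simp only [pvFold_eq]
    have hmap : text.toList.map (fun ch => if PySem.Chars.isalnum ch then ch else '-') =
        text.toList.map pvEnc := by
      simp [pvEnc]
    rw [hmap, pvSplitOn_eq]
    have hm := (pvMain text.toList).1 false
    simp only [List.nil_append]
    exact congrArg String.ofList hm.symm
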